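-- pv_equiv track=rewrite | github.com/go-go-golems/esp32-s3-m5 | ttmp/2026/01/14/MO-002-ATOMS3R-CAMERA-CONSOLE-USER-DEMO--atoms3r-cam-userdemo-usb-serial-jtag-console/scripts/debug_db/backfill_metrics.py | compute_step_changes
-- ===== SOURCE A (Python) =====
-- def compute_step_changes(step_names):
--     last = None
--     changes = 0
--     for step in step_names:
--         if step is None:
--             continue
--         if last is None:
--             last = step
--             continue
--         if step != last:
--             changes += 1
--             last = step
--     return changes
-- ===== SOURCE B (Python) =====
-- def _dc(xs):
--     # divide and conquer: changes in xs = changes(left) + changes(right) + boundary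
--     if len(xs) < 2:
--         return 0
--     m = len(xs) // 2
--     left, right = xs[:m], xs[m:]
--     return _dc(left) + _dc(right) + (1 if left[-1] != right[0] else 0)
--
-- def compute_step_changes(step_names):
--     filtered = [s for s in step_names if s is not None]
--     return _dc(filtered)
-- ===== Notes on version B (the rewrite author's own statement) =====
-- stated objective: alternative
-- what changed: B filters out None once, then counts name changes by divide and conquer: recursively split the filtered list in half, add the two halves' counts plus 1 if the boundary pair differs, instead of A's single stateful last/changes scan.
import Mathlib
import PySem

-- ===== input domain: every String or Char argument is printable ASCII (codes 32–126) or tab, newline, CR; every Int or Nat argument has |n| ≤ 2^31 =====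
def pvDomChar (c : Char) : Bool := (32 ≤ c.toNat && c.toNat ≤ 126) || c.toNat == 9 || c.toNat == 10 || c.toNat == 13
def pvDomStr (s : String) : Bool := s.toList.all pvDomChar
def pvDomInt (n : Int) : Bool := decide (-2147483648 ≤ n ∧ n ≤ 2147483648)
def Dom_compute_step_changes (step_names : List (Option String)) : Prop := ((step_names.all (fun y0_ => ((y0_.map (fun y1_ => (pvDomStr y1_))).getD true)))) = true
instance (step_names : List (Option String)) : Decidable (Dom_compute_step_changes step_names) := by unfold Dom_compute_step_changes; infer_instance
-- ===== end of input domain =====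

-- B filters out None once, then counts changes by divide and conquer (split in half, add boundary); objective: alternative.

-- ===== PORT A =====
-- A's for-loop over step_names carrying (last, changes)
def pvLoopA : List (Option String) → Option String → Int → Int
  | [], _, changes => changes
  | step :: rest, last, changes =>
    match step with
    | none => pvLoopA rest last changes
    | some s =>
      match last with
      | none => pvLoopA rest (some s) changes
      | some l =>
        if s ≠ l then pvLoopA rest (some s) (changes + 1)
        else pvLoopA rest (some l) changes

def compute_step_changes (step_names : List (Option String)) : Int :=
  pvLoopA step_names none 0

-- ===== PORT B =====
-- _dc: divide and conquer.  left[-1] / right[0] are ported as getLast? / head?; both lists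
-- are nonempty when the branch is reached, so the Option comparison is exactly Python's
-- string comparison of left[-1] and right[0].
def pvDC (xs : List String) : Int :=
  if _h : xs.length < 2 then 0
  else
    pvDC (xs.take (xs.length / 2)) + pvDC (xs.drop (xs.length / 2)) +
      (if (xs.take (xs.length / 2)).getLast? ≠ (xs.drop (xs.length / 2)).head? then 1 else 0)
termination_by xs.length
decreasing_by
  · simp only [List.length_take]; omega
  · simp only [List.length_drop]; omega

def compute_step_changes_alt (step_names : List (Option String)) : Int :=
  let filtered := step_names.filterMap id
  pvDC filtered

-- ===== PRECONDITION & SPEC =====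
def Spec_compute_step_changes (step_names : List (Option String)) (out : Int) : Prop := out = compute_step_changes_alt step_names
instance (step_names : List (Option String)) (out : Int) : Decidable (Spec_compute_step_changes step_names out) := by unfold Spec_compute_step_changes; infer_instance

-- ===== CLAIM =====
def Claim_equal_compute_step_changes : Prop := ∀ (step_names : List (Option String)), Dom_compute_step_changes step_names → Spec_compute_step_changes step_names (compute_step_changes step_names)

-- ===== LEMMAS AND PROOFS =====

-- number of adjacent differing pairs
def pvTrans : List String → Int
  | [] => 0
  | [_] => 0
  | a :: b :: t => (if a = b then 0 else 1) + pvTrans (b :: t)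

theorem pvLoopA_inv (xs : List (Option String)) :
    ∀ (last : Option String) (c : Int),
    pvLoopA xs last c = c + pvTrans (last.toList ++ xs.filterMap id) := by
  induction xs with
  | nil =>
    intro last c
    cases last <;> simp [pvLoopA, pvTrans]
  | cons step rest ih =>
    intro last c
    cases step with
    | none => simpa [pvLoopA] using ih last c
    | some s =>
      cases last with
      | none => simpa [pvLoopA] using ih (some s) c
      | some l =>
        by_cases h : s = l
        · subst h
          simp [pvLoopA, pvTrans, ih (some s) c]
        · simp only [pvLoopA, if_pos h, pvTrans, List.filterMap_cons, id, Option.toList,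
            List.cons_append, List.nil_append, if_neg (Ne.symm h)]
          rw [ih (some s) (c + 1)]
          simp
          ring

theorem pvTrans_append (xs ys : List String) (hx : xs ≠ []) (hy : ys ≠ []) :
    pvTrans (xs ++ ys) = pvTrans xs + pvTrans ys +
      (if xs.getLast? ≠ ys.head? then 1 else 0) := by
  induction xs with
  | nil => exact absurd rfl hx
  | cons a t ih =>
    cases t with
    | nil =>
      cases ys with
      | nil => exact absurd rfl hy
      | cons b u =>
        by_cases h : a = b <;> (simp [pvTrans, h]; try ring)
    | cons c u =>
      have hih := ih (by simp)
      simp only [List.cons_append, pvTrans, List.getLast?_cons_cons]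
      rw [show (c :: (u ++ ys)) = (c :: u) ++ ys from rfl, hih]
      ring

theorem pvDC_eq (xs : List String) : pvDC xs = pvTrans xs := by
  rw [pvDC]
  by_cases h : xs.length < 2
  · rw [dif_pos h]
    match xs, h with
    | [], _ => simp [pvTrans]
    | [a], _ => simp [pvTrans]
  · rw [dif_neg h]
    have hl : xs.length / 2 < xs.length := by omega
    have hm : 1 ≤ xs.length / 2 := by omega
    have h1 : (xs.take (xs.length / 2)).length < xs.length := by
      simp only [List.length_take]; omega
    have h2 : (xs.drop (xs.length / 2)).length < xs.length := by
      simp only [List.length_drop]; omega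
    have hne1 : xs.take (xs.length / 2) ≠ [] := by
      apply List.ne_nil_of_length_pos
      simp only [List.length_take]; omega
    have hne2 : xs.drop (xs.length / 2) ≠ [] := by
      apply List.ne_nil_of_length_pos
      simp only [List.length_drop]; omega
    rw [pvDC_eq (xs.take (xs.length / 2)), pvDC_eq (xs.drop (xs.length / 2))]
    have := pvTrans_append (xs.take (xs.length / 2)) (xs.drop (xs.length / 2)) hne1 hne2
    rw [List.take_append_drop] at this
    rw [this]
termination_by xs.length
decreasing_by
  · exact h1
  · exact h2

-- ===== VERDICT =====
theorem compute_step_changes_spec : Claim_equal_compute_step_changes := by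
  intro xs _
  unfold Spec_compute_step_changes compute_step_changes compute_step_changes_alt
  rw [pvLoopA_inv xs none 0, pvDC_eq]
  simp
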